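-- pv_equiv track=rewrite | github.com/yaochongchow/casual_scene_graph | visual_genome_loader.py | classify_scene
-- ===== SOURCE A (Python) =====
-- from typing import Callable, Dict, List, Optional, Set, Tuple
--
-- SCENE_KEYWORDS = {
--     0: {  # Bedroom
--         'bed', 'pillow', 'blanket', 'lamp', 'dresser', 'nightstand',
--         'bedroom', 'mattress', 'comforter', 'headboard', 'alarm clock'
--     },
--     1: {  # Bathroom
--         'toilet', 'sink', 'bathtub', 'shower', 'mirror', 'bathroom',
--         'towel', 'faucet', 'tile', 'soap', 'toothbrush'
--     },
--     2: {  # Outdoor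
--         'tree', 'sky', 'grass', 'cloud', 'mountain', 'outdoor', 'street',
--         'road', 'building', 'car', 'sun', 'flower', 'bush', 'sidewalk',
--         'beach', 'ocean', 'water', 'park', 'field'
--     },
--     3: {  # Kitchen
--         'stove', 'refrigerator', 'oven', 'microwave', 'cabinet', 'kitchen',
--         'counter', 'dish', 'pot', 'pan', 'plate', 'cup', 'bowl', 'fork',
--         'knife', 'spoon', 'food'
--     },
-- }
--
-- def classify_scene(objects: List[str]) -> int:
--     """
--     Classify a scene based on objects present.
--
--     Uses keyword matching with priority ordering.
--
--     Args:
--         objects: List of object names in the scene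
--
--     Returns:
--         Scene class index (0-4)
--     """
--     objects_lower = {obj.lower() for obj in objects}
--
--     # Count matches for each scene type
--     scores = {}
--     for class_id, keywords in SCENE_KEYWORDS.items():
--         matches = objects_lower & keywords
--         scores[class_id] = len(matches)
--
--     # Get class with most matches
--     if max(scores.values()) > 0:
--         best_class = max(scores, key=scores.get)
--         return best_class
--
--     # Default to "Other"
--     return 4
-- ===== SOURCE B (Python) =====
-- SCENE_KEYWORDS = {
--     0: {'bed', 'pillow', 'blanket', 'lamp', 'dresser', 'nightstand',
--         'bedroom', 'mattress', 'comforter', 'headboard', 'alarm clock'},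
--     1: {'toilet', 'sink', 'bathtub', 'shower', 'mirror', 'bathroom',
--         'towel', 'faucet', 'tile', 'soap', 'toothbrush'},
--     2: {'tree', 'sky', 'grass', 'cloud', 'mountain', 'outdoor', 'street',
--         'road', 'building', 'car', 'sun', 'flower', 'bush', 'sidewalk',
--         'beach', 'ocean', 'water', 'park', 'field'},
--     3: {'stove', 'refrigerator', 'oven', 'microwave', 'cabinet', 'kitchen',
--         'counter', 'dish', 'pot', 'pan', 'plate', 'cup', 'bowl', 'fork',
--         'knife', 'spoon', 'food'},
-- }
--
-- # Inverted index: each keyword maps to its unique class id (the four sets are disjoint).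
-- _KEYWORD_CLASS = {kw: cid for cid, kws in SCENE_KEYWORDS.items() for kw in kws}
--
--
-- def classify_scene(objects):
--     scores = [0, 0, 0, 0]
--     for obj in {o.lower() for o in objects}:
--         cid = _KEYWORD_CLASS.get(obj)
--         if cid is not None:
--             scores[cid] += 1
--     best, best_score = 4, 0
--     for cid in range(4):
--         if scores[cid] > best_score:
--             best, best_score = cid, scores[cid]
--     return best
-- ===== Notes on version B (the rewrite author's own statement) =====
-- stated objective: alternative
-- what changed: Replaces the four per-class set intersections and the dict-based double max (max of values, then max of keys keyed by score) with a single pass over the deduplicated lowered objects through an inverted keyword-to-class index and one strict-argmax array scan.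
import Mathlib
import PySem

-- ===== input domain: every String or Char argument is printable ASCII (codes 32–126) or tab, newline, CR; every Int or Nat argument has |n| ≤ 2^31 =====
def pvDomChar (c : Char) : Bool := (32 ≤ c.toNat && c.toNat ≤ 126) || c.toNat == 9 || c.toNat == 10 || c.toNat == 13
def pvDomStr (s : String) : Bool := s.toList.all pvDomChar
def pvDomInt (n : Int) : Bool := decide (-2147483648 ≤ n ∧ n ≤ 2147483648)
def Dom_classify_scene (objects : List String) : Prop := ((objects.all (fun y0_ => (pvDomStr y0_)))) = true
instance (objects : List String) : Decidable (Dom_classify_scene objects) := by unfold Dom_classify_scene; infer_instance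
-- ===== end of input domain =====

-- B replaces the four set-intersections and the dict argmax by a single pass over the deduplicated
-- lowered objects through an inverted keyword→class index plus a strict-argmax scan (alternative).

-- ===== PORT A =====
-- Python set literals; A only takes lengths of intersections, so element order is irrelevant.
def kwBedroom : PySem.Set String :=
  ["bed", "pillow", "blanket", "lamp", "dresser", "nightstand",
   "bedroom", "mattress", "comforter", "headboard", "alarm clock"]
def kwBathroom : PySem.Set String :=
  ["toilet", "sink", "bathtub", "shower", "mirror", "bathroom",
   "towel", "faucet", "tile", "soap", "toothbrush"]
def kwOutdoor : PySem.Set String :=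
  ["tree", "sky", "grass", "cloud", "mountain", "outdoor", "street",
   "road", "building", "car", "sun", "flower", "bush", "sidewalk",
   "beach", "ocean", "water", "park", "field"]
def kwKitchen : PySem.Set String :=
  ["stove", "refrigerator", "oven", "microwave", "cabinet", "kitchen",
   "counter", "dish", "pot", "pan", "plate", "cup", "bowl", "fork",
   "knife", "spoon", "food"]

def SCENE_KEYWORDS : PySem.Dict Int (PySem.Set String) :=
  ⟨[(0, kwBedroom), (1, kwBathroom), (2, kwOutdoor), (3, kwKitchen)]⟩

def classify_scene (objects : List String) : Int :=
  let objectsLower : PySem.Set String := PySem.Set.ofList (objects.map PySem.Str.lower)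
  let scores : PySem.Dict Int Int :=
    SCENE_KEYWORDS.items.foldl
      (fun d p => PySem.Dict.insert d p.1 (PySem.Set.len (PySem.Set.inter objectsLower p.2)))
      ⟨[]⟩
  if (PySem.List.max? (PySem.Dict.values scores) (fun v => v)).getD 0 > 0 then
    (PySem.List.max? (PySem.Dict.keys scores) (fun k => PySem.Dict.getD scores k 0)).getD 4
  else
    4

-- ===== PORT B =====
-- The dict comprehension {kw: cid for cid, kws in SCENE_KEYWORDS.items() for kw in kws}:
-- all keyword sets are disjoint, so no key is ever overwritten and the items list is the
-- concatenation of the four keyword lists tagged with their class id.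
def kwClass : PySem.Dict String Int :=
  ⟨kwBedroom.map (fun w => (w, 0)) ++ kwBathroom.map (fun w => (w, 1)) ++
   kwOutdoor.map (fun w => (w, 2)) ++ kwKitchen.map (fun w => (w, 3))⟩

def classify_scene_alt (objects : List String) : Int :=
  let scores : List Int :=
    (PySem.Set.ofList (objects.map PySem.Str.lower)).foldl
      (fun s o =>
        match PySem.Dict.get? kwClass o with
        | some cid => PySem.List.pySetD s cid (PySem.List.pyGetD s cid 0 + 1)
        | none => s)
      [0, 0, 0, 0]
  ((PySem.List.pyRange 0 4 1).foldl
      (fun (bb : Int × Int) cid =>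
        if PySem.List.pyGetD scores cid 0 > bb.2 then (cid, PySem.List.pyGetD scores cid 0) else bb)
      (4, 0)).1

-- ===== PRECONDITION & SPEC =====
def Spec_classify_scene (objects : List String) (out : Int) : Prop := out = classify_scene_alt objects
instance (objects : List String) (out : Int) : Decidable (Spec_classify_scene objects out) := by unfold Spec_classify_scene; infer_instance

-- ===== CLAIM (what is proved, stated in full; the proofs are below) =====
def Claim_equal_classify_scene : Prop := ∀ (objects : List String), Dom_classify_scene objects → Spec_classify_scene objects (classify_scene objects)

-- ===== LEMMAS AND PROOFS =====

-- named fold steps shared by the proof: value max, keyed max, pair max, B's best-scan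
def stepV : Option Int → Int → Option Int := fun acc x =>
  match acc with
  | none => some x
  | some m => if m < x then some x else some m

def stepK {α : Type} (key : α → Int) : Option α → α → Option α := fun acc x =>
  match acc with
  | none => some x
  | some m => if key m < key x then some x else some m

def stepP {α : Type} : Option (α × Int) → (α × Int) → Option (α × Int) := fun acc p =>
  match acc with
  | none => some p
  | some q => if q.2 < p.2 then some p else some q

def stepB : Int × Int → Int × Int → Int × Int := fun bb p =>
  if p.2 > bb.2 then p else bb

def bstate (acc : Option (Int × Int)) : Int × Int :=
  match acc with
  | none => (4, 0)
  | some q => if 0 < q.2 then q else (4, 0)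

lemma max?_id_foldl (xs : List Int) :
    PySem.List.max? xs (fun v => v) = xs.foldl stepV none := by
  unfold PySem.List.max?
  congr 1
  funext acc x
  cases acc <;> rfl

lemma max?_key_foldl {α : Type} (key : α → Int) (xs : List α) :
    PySem.List.max? xs key = xs.foldl (stepK key) none := by
  unfold PySem.List.max?
  congr 1

-- keyed first-argmax = first component of the pair fold
lemma foldl_stepK_eq {α : Type} (key : α → Int) (ks : List α) : ∀ acc : Option α,
    ks.foldl (stepK key) acc =
      ((ks.map (fun k => (k, key k))).foldl stepP (acc.map (fun m => (m, key m)))).map Prod.fst := by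
  induction ks with
  | nil => intro acc; cases acc <;> rfl
  | cons x ks ih =>
    intro acc
    cases acc with
    | none => simpa [stepK, stepP] using ih (some x)
    | some m =>
      simp only [List.map_cons, List.foldl_cons, Option.map_some, stepK, stepP]
      by_cases h1 : key m < key x <;> simp [h1] <;> [exact ih (some x); exact ih (some m)]

-- value first-max = second component of the pair fold
lemma foldl_stepV_eq (L : List (Int × Int)) : ∀ acc : Option (Int × Int),
    (L.map Prod.snd).foldl stepV (acc.map Prod.snd) = (L.foldl stepP acc).map Prod.snd := by
  induction L with
  | nil => intro acc; rfl
  | cons p L ih =>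
    intro acc
    cases acc with
    | none => simpa [stepV, stepP] using ih (some p)
    | some q =>
      simp only [List.map_cons, List.foldl_cons, Option.map_some, stepV, stepP]
      by_cases h1 : q.2 < p.2 <;> simp [h1] <;> [exact ih (some p); exact ih (some q)]

-- B's running-best scan simulates the pair fold through bstate
lemma foldlB_eq_bstate (L : List (Int × Int)) : ∀ acc : Option (Int × Int),
    L.foldl stepB (bstate acc) = bstate (L.foldl stepP acc) := by
  induction L with
  | nil => intro acc; rfl
  | cons p L ih =>
    intro acc
    have hstep : stepB (bstate acc) p = bstate (stepP acc p) := by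
      cases acc with
      | none =>
        simp only [bstate, stepB, stepP]
      | some q =>
        by_cases hqp : q.2 < p.2 <;>
          simp only [bstate, stepB, stepP, hqp, if_true, if_false] <;>
          split_ifs <;> first | rfl | (exfalso; omega)
    rw [List.foldl_cons, List.foldl_cons, hstep]
    exact ih _

lemma foldl_stepP_some {α : Type} (L : List (α × Int)) : ∀ q : α × Int,
    ∃ r, L.foldl stepP (some q) = some r := by
  induction L with
  | nil => exact fun q => ⟨q, rfl⟩
  | cons p L ih =>
    intro q
    rw [List.foldl_cons]
    show ∃ r, L.foldl stepP (if q.2 < p.2 then some p else some q) = some r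
    split_ifs <;> apply ih

-- find? over a constant-tagged block
lemma find?_tag (x : String) (c : Int) (l : List String) (rest : List (String × Int)) :
    List.find? (fun p => p.1 == x) (l.map (fun w => (w, c)) ++ rest) =
      if x ∈ l then some (x, c) else List.find? (fun p => p.1 == x) rest := by
  induction l with
  | nil => simp
  | cons w l ih =>
    by_cases h : w = x
    · subst h; simp
    · have hpw : ((w, c).1 == x) = false := by simp [h]
      have hxw : ¬x = w := fun hh => h hh.symm
      by_cases hx : x ∈ l <;>
        simp [List.map_cons, List.cons_append, hpw, ih, hx, hxw]

-- get? on the inverted index classifies membership in the four keyword lists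
lemma get?_kwClass (x : String) :
    PySem.Dict.get? kwClass x =
      (if x ∈ kwBedroom then some 0 else if x ∈ kwBathroom then some 1
       else if x ∈ kwOutdoor then some 2 else if x ∈ kwKitchen then some 3 else none) := by
  show Option.map Prod.snd (List.find? (fun p => p.1 == x) kwClass.items) = _
  have : kwClass.items = kwBedroom.map (fun w => (w, 0)) ++
      (kwBathroom.map (fun w => (w, 1)) ++ (kwOutdoor.map (fun w => (w, 2)) ++
      (kwKitchen.map (fun w => (w, 3)) ++ []))) := by simp [kwClass]
  rw [this, find?_tag, find?_tag, find?_tag, find?_tag]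
  split_ifs <;> simp

lemma all_not_mem {l1 l2 : List String} (h : l1.all (fun w => !l2.contains w) = true)
    {x : String} (hx : x ∈ l1) : x ∉ l2 := by
  rw [List.all_eq_true] at h
  have := h x hx
  simpa using this

lemma disj_01 : kwBedroom.all (fun w => !kwBathroom.contains w) = true := by decide
lemma disj_02 : kwBedroom.all (fun w => !kwOutdoor.contains w) = true := by decide
lemma disj_03 : kwBedroom.all (fun w => !kwKitchen.contains w) = true := by decide
lemma disj_12 : kwBathroom.all (fun w => !kwOutdoor.contains w) = true := by decide
lemma disj_13 : kwBathroom.all (fun w => !kwKitchen.contains w) = true := by decide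
lemma disj_23 : kwOutdoor.all (fun w => !kwKitchen.contains w) = true := by decide

-- B's score-accumulating fold counts, per class, the members of the list
lemma scoresB (L : List String) : ∀ a b c d : Int,
    L.foldl
      (fun s o =>
        match PySem.Dict.get? kwClass o with
        | some cid => PySem.List.pySetD s cid (PySem.List.pyGetD s cid 0 + 1)
        | none => s)
      [a, b, c, d] =
      [a + (L.countP (· ∈ kwBedroom) : Int), b + (L.countP (· ∈ kwBathroom) : Int),
       c + (L.countP (· ∈ kwOutdoor) : Int), d + (L.countP (· ∈ kwKitchen) : Int)] := by
  induction L with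
  | nil => intro a b c d; simp
  | cons x L ih =>
    intro a b c d
    rw [List.foldl_cons, get?_kwClass]
    by_cases h0 : x ∈ kwBedroom
    · have n1 := all_not_mem disj_01 h0
      have n2 := all_not_mem disj_02 h0
      have n3 := all_not_mem disj_03 h0
      simp only [h0, if_true]
      show L.foldl _ [a + 1, b, c, d] = _
      rw [ih]
      simp [h0, n1, n2, n3]
      ring
    · by_cases h1 : x ∈ kwBathroom
      · have n2 := all_not_mem disj_12 h1
        have n3 := all_not_mem disj_13 h1
        simp only [h0, if_false, h1, if_true]
        show L.foldl _ [a, b + 1, c, d] = _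
        rw [ih]
        simp [h0, h1, n2, n3]
        ring
      · by_cases h2 : x ∈ kwOutdoor
        · have n3 := all_not_mem disj_23 h2
          simp only [h0, if_false, h1, h2, if_true]
          show L.foldl _ [a, b, c + 1, d] = _
          rw [ih]
          simp [h0, h1, h2, n3]
          ring
        · by_cases h3 : x ∈ kwKitchen
          · simp only [h0, if_false, h1, h2, h3, if_true]
            show L.foldl _ [a, b, c, d + 1] = _
            rw [ih]
            simp [h0, h1, h2, h3]
            ring
          · simp only [h0, if_false, h1, h2, h3]
            rw [ih]
            simp [h0, h1, h2, h3]

-- intersection length = membership count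
lemma interLen (L K : List String) :
    PySem.Set.len (PySem.Set.inter L K) = (L.countP (· ∈ K) : Int) := by
  simp only [PySem.Set.len, PySem.Set.inter, PySem.Set.contains]
  rw [List.countP_eq_length_filter]
  norm_cast
  congr 1
  apply List.filter_congr
  intro x _
  simp

-- the two selection phases agree on any score vector
lemma select (v0 v1 v2 v3 : Int) :
    (if (PySem.List.max? [v0, v1, v2, v3] (fun v => v)).getD 0 > 0 then
       (PySem.List.max? [(0 : Int), 1, 2, 3]
         (fun k => PySem.Dict.getD (⟨[(0, v0), (1, v1), (2, v2), (3, v3)]⟩ : PySem.Dict Int Int) k 0)).getD 4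
     else 4) =
    ((PySem.List.pyRange 0 4 1).foldl
      (fun (bb : Int × Int) cid =>
        if PySem.List.pyGetD [v0, v1, v2, v3] cid 0 > bb.2 then
          (cid, PySem.List.pyGetD [v0, v1, v2, v3] cid 0) else bb)
      (4, 0)).1 := by
  have hvals : ([((0 : Int), v0), (1, v1), (2, v2), (3, v3)].map Prod.snd) = [v0, v1, v2, v3] := rfl
  have hkey : ([(0 : Int), 1, 2, 3].map (fun k =>
      (k, (fun k => PySem.Dict.getD (⟨[(0, v0), (1, v1), (2, v2), (3, v3)]⟩ : PySem.Dict Int Int) k 0) k))) =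
      [(0, v0), (1, v1), (2, v2), (3, v3)] := rfl
  have hr : PySem.List.pyRange 0 4 1 = [0, 1, 2, 3] := by decide
  rw [hr]
  have hg : ([(0 : Int), 1, 2, 3].map (fun cid => (cid, PySem.List.pyGetD [v0, v1, v2, v3] cid 0))) =
      [(0, v0), (1, v1), (2, v2), (3, v3)] := rfl
  have hB : ([(0 : Int), 1, 2, 3].foldl
      (fun (bb : Int × Int) cid =>
        if PySem.List.pyGetD [v0, v1, v2, v3] cid 0 > bb.2 then
          (cid, PySem.List.pyGetD [v0, v1, v2, v3] cid 0) else bb)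
      ((4 : Int), (0 : Int))) =
      ([((0 : Int), v0), (1, v1), (2, v2), (3, v3)].foldl stepB ((4 : Int), (0 : Int))) := by
    rw [← hg, List.foldl_map]
    rfl
  rw [hB, show ((4 : Int), (0 : Int)) = bstate none from rfl, foldlB_eq_bstate]
  rw [max?_id_foldl, max?_key_foldl]
  have hv := foldl_stepV_eq [((0 : Int), v0), (1, v1), (2, v2), (3, v3)] none
  simp only [Option.map_none] at hv
  rw [hvals] at hv
  rw [hv]
  have hk := foldl_stepK_eq
    (fun k => PySem.Dict.getD (⟨[(0, v0), (1, v1), (2, v2), (3, v3)]⟩ : PySem.Dict Int Int) k 0)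
    [(0 : Int), 1, 2, 3] none
  simp only [Option.map_none] at hk
  rw [hkey] at hk
  rw [hk]
  rw [List.foldl_cons, show stepP (none : Option (Int × Int)) ((0 : Int), v0) = some (0, v0) from rfl]
  obtain ⟨r, hr2⟩ := foldl_stepP_some [((1 : Int), v1), (2, v2), (3, v3)] ((0 : Int), v0)
  rw [hr2]
  simp only [Option.map_some, Option.getD_some, bstate]
  split_ifs <;> rfl

-- ===== VERDICT (by name: the statement is the Claim_ definition above) =====
theorem classify_scene_spec : Claim_equal_classify_scene := by
  intro objects _
  unfold Spec_classify_scene classify_scene classify_scene_alt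
  dsimp only
  rw [scoresB]
  set L := PySem.Set.ofList (objects.map PySem.Str.lower) with hL
  have hscores : ([((0 : Int), kwBedroom), (1, kwBathroom), (2, kwOutdoor), (3, kwKitchen)].foldl
      (fun d p => PySem.Dict.insert d p.1 (PySem.Set.len (PySem.Set.inter L p.2)))
      (⟨[]⟩ : PySem.Dict Int Int)) =
      ⟨[(0, PySem.Set.len (PySem.Set.inter L kwBedroom)),
        (1, PySem.Set.len (PySem.Set.inter L kwBathroom)),
        (2, PySem.Set.len (PySem.Set.inter L kwOutdoor)),
        (3, PySem.Set.len (PySem.Set.inter L kwKitchen))]⟩ := rfl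
  rw [show SCENE_KEYWORDS.items = [((0 : Int), kwBedroom), (1, kwBathroom), (2, kwOutdoor), (3, kwKitchen)] from rfl,
    hscores]
  simp only [interLen, zero_add, PySem.Dict.values, PySem.Dict.keys, List.map]
  exact select _ _ _ _
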